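-- pv_equiv track=rewrite | github.com/superchangme/snake-ai-algorithm | backend/phase6_bfs_hamilton.py | build_hamilton_path
-- ===== SOURCE A (Python) =====
-- def build_hamilton_path(width, height):
--     """生成蛇形 Hamilton 路径"""
--     path = []
--     for y in range(height):
--         if y % 2 == 0:
--             for x in range(width):
--                 path.append((x, y))
--         else:
--             for x in range(width - 1, -1, -1):
--                 path.append((x, y))
--     return path
-- ===== SOURCE B (Python) =====
-- def build_hamilton_path(width, height):
--     """生成蛇形 Hamilton 路径 (single flat pass over the linear cell index)"""
--     if width <= 0 or height <= 0:
--         return []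
--     path = []
--     for i in range(width * height):
--         y, col = divmod(i, width)
--         path.append((col if y % 2 == 0 else width - 1 - col, y))
--     return path
-- ===== Notes on version B (the rewrite author's own statement) =====
-- stated objective: alternative
-- what changed: Replaced the nested row loop with a direction-reversing inner loop by a single flat loop over the linear cell index, recovering (row, column) with divmod and computing the snake x-coordinate by closed-form arithmetic.
import Mathlib
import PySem

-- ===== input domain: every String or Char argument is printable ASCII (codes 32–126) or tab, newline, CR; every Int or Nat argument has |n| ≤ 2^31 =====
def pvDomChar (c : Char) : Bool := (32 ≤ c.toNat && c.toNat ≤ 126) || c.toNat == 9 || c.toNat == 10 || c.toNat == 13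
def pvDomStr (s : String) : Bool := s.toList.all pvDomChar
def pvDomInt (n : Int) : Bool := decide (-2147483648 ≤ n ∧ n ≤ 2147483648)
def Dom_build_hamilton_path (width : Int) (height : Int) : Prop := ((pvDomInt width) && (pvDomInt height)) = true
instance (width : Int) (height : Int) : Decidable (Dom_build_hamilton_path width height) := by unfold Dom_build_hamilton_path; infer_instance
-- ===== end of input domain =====

-- B replaces A's nested row/column loops (with a direction-reversing inner loop) by one flat
-- loop over the linear cell index, recovering coordinates with divmod; alternative decomposition, same cost.


-- ===== PORT A =====
def build_hamilton_path (width : Int) (height : Int) : List (Int × Int) :=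
  (PySem.List.pyRange 0 height 1).foldl (fun path y =>
    if PySem.Int.mod y 2 == 0 then
      (PySem.List.pyRange 0 width 1).foldl (fun p x => p ++ [(x, y)]) path
    else
      (PySem.List.pyRange (width - 1) (-1) (-1)).foldl (fun p x => p ++ [(x, y)]) path) []

-- ===== PORT B =====
def build_hamilton_path_alt (width : Int) (height : Int) : List (Int × Int) :=
  if width ≤ 0 ∨ height ≤ 0 then []
  else
    (PySem.List.pyRange 0 (width * height) 1).foldl (fun path i =>
      let y := PySem.Int.floordiv i width
      let col := PySem.Int.mod i width
      path ++ [(if PySem.Int.mod y 2 == 0 then col else width - 1 - col, y)]) []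

-- ===== PRECONDITION & SPEC =====
def Spec_build_hamilton_path (width : Int) (height : Int) (out : List (Int × Int)) : Prop := out = build_hamilton_path_alt width height
instance (width : Int) (height : Int) (out : List (Int × Int)) : Decidable (Spec_build_hamilton_path width height out) := by unfold Spec_build_hamilton_path; infer_instance

-- ===== CLAIM (what is proved, stated in full; the proofs are below) =====
def Claim_equal_build_hamilton_path : Prop := ∀ (width : Int) (height : Int), Dom_build_hamilton_path width height → Spec_build_hamilton_path width height (build_hamilton_path width height)

-- ===== LEMMAS AND PROOFS =====

-- one snake row at height y, as a closed form both ports are reduced to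
def pvRow (width : Int) (y : Int) : List (Int × Int) :=
  if 2 ∣ y then (List.range width.toNat).map (fun k : Nat => ((k : Int), y))
  else (List.range width.toNat).map (fun k : Nat => (width - 1 - (k : Int), y))

def pvCanon (width : Int) (h : Nat) : List (Int × Int) :=
  List.flatMap (fun y : Nat => pvRow width (y : Int)) (List.range h)

lemma pvRow_even (width y : Int) (hy : 2 ∣ y) (path : List (Int × Int)) :
    (PySem.List.pyRange 0 width 1).foldl (fun p x => p ++ [(x, y)]) path = path ++ pvRow width y := by
  rw [PySem.List.foldl_append_singleton_eq_map, PySem.List.pyRange_one, List.map_map]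
  unfold pvRow
  rw [if_pos hy]
  simp only [Int.sub_zero, zero_add]
  rfl

lemma pvRow_odd (width y : Int) (hy : ¬ 2 ∣ y) (path : List (Int × Int)) :
    (PySem.List.pyRange (width - 1) (-1) (-1)).foldl (fun p x => p ++ [(x, y)]) path
      = path ++ pvRow width y := by
  have h1 : (width - 1 - (-1)).toNat = width.toNat := by omega
  rw [PySem.List.foldl_append_singleton_eq_map, PySem.List.pyRange_neg_one, List.map_map, h1]
  unfold pvRow
  rw [if_neg hy]
  rfl

lemma pvA_fold (width : Int) (ys : List Int) (path : List (Int × Int)) :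
    ys.foldl (fun path y =>
      if PySem.Int.mod y 2 == 0 then
        (PySem.List.pyRange 0 width 1).foldl (fun p x => p ++ [(x, y)]) path
      else
        (PySem.List.pyRange (width - 1) (-1) (-1)).foldl (fun p x => p ++ [(x, y)]) path) path
    = path ++ ys.flatMap (fun y => pvRow width y) := by
  induction ys generalizing path with
  | nil => simp
  | cons y ys ih =>
    rw [List.foldl_cons, List.flatMap_cons]
    by_cases hy : 2 ∣ y
    · have hc : (PySem.Int.mod y 2 == 0) = true := by
        simp [hy]
      rw [if_pos hc, pvRow_even width y hy, ih, List.append_assoc]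
    · have hc : ¬ ((PySem.Int.mod y 2 == 0) = true) := by
        simp [hy]
      rw [if_neg hc, pvRow_odd width y hy, ih, List.append_assoc]

lemma pvA_canon (width height : Int) :
    build_hamilton_path width height = pvCanon width height.toNat := by
  unfold build_hamilton_path pvCanon
  rw [pvA_fold, PySem.List.pyRange_one, List.flatMap_map]
  simp only [List.nil_append, zero_add, Int.sub_zero]

lemma pvB_fold (width : Int) (is : List Int) (path : List (Int × Int)) :
    is.foldl (fun path i =>
      let y := PySem.Int.floordiv i width
      let col := PySem.Int.mod i width
      path ++ [(if PySem.Int.mod y 2 == 0 then col else width - 1 - col, y)]) path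
    = path ++ is.map (fun i =>
        (if PySem.Int.mod (PySem.Int.floordiv i width) 2 == 0 then PySem.Int.mod i width
         else width - 1 - PySem.Int.mod i width, PySem.Int.floordiv i width)) := by
  induction is generalizing path with
  | nil => simp
  | cons i is ih => rw [List.foldl_cons, List.map_cons, ih, List.append_assoc]; rfl

lemma pvB_cell (width : Int) (hw : 0 < width) (h k : Nat) (hk : k < width.toNat) :
    PySem.Int.floordiv ((width.toNat * h + k : Nat) : Int) width = (h : Int) ∧
    PySem.Int.mod ((width.toNat * h + k : Nat) : Int) width = (k : Int) := by
  have hdiv := PySem.Int.floordiv_mul_add_mod ((width.toNat * h + k : Nat) : Int) width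
  have hwt : (width.toNat : Int) = width := Int.toNat_of_nonneg (le_of_lt hw)
  have heq : PySem.Int.floordiv ((width.toNat * h + k : Nat) : Int) width = (h : Int) := by
    have hki : (k : Int) < width := by omega
    rw [PySem.Int.floordiv_eq_iff_of_pos hw]
    push_cast
    rw [hwt]
    constructor <;> nlinarith [hki, Int.natCast_nonneg k, Int.natCast_nonneg h]
  refine ⟨heq, ?_⟩
  rw [heq] at hdiv
  push_cast at hdiv ⊢
  rw [hwt] at hdiv ⊢
  linarith [hdiv, mul_comm (h : Int) width]

lemma pvB_canon (width : Int) (hw : 0 < width) (h : Nat) :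
    (List.range (width.toNat * h)).map (fun k =>
      (if PySem.Int.mod (PySem.Int.floordiv ((k : Nat) : Int) width) 2 == 0 then
          PySem.Int.mod ((k : Nat) : Int) width
        else width - 1 - PySem.Int.mod ((k : Nat) : Int) width,
       PySem.Int.floordiv ((k : Nat) : Int) width))
    = pvCanon width h := by
  induction h with
  | zero => simp [pvCanon]
  | succ h ih =>
    have hr : width.toNat * (h + 1) = width.toNat * h + width.toNat := by ring
    rw [hr, List.range_add, List.map_append, ih]
    unfold pvCanon
    rw [List.range_succ, List.flatMap_append, List.flatMap_cons, List.flatMap_nil,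
      List.append_nil, List.map_map]
    congr 1
    unfold pvRow
    by_cases hy : 2 ∣ ((h : Nat) : Int)
    · have hc : (PySem.Int.mod ((h : Nat) : Int) 2 == 0) = true := by
        simp [hy]
      rw [if_pos hy]
      refine List.map_congr_left (fun k hk => ?_)
      simp only [List.mem_range] at hk
      obtain ⟨hd, hm⟩ := pvB_cell width hw h k hk
      simp only [Function.comp_apply]
      rw [hd, hm, if_pos hc]
    · have hc : ¬ ((PySem.Int.mod ((h : Nat) : Int) 2 == 0) = true) := by
        simp [hy]
      rw [if_neg hy]
      refine List.map_congr_left (fun k hk => ?_)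
      simp only [List.mem_range] at hk
      obtain ⟨hd, hm⟩ := pvB_cell width hw h k hk
      simp only [Function.comp_apply]
      rw [hd, hm, if_neg hc]

-- ===== VERDICT (by name: the statement is the Claim_ definition above) =====
theorem build_hamilton_path_spec : Claim_equal_build_hamilton_path := by
  unfold Claim_equal_build_hamilton_path
  intro width height _
  unfold Spec_build_hamilton_path build_hamilton_path_alt
  rw [pvA_canon]
  by_cases hz : width ≤ 0 ∨ height ≤ 0
  · rw [if_pos hz]
    rcases hz with hz | hz
    · have hwt : width.toNat = 0 := by omega
      simp [pvCanon, pvRow, hwt]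
    · have hht : height.toNat = 0 := by omega
      simp [pvCanon, hht]
  · rw [if_neg hz]
    have hw : 0 < width := by omega
    have hh : 0 < height := by omega
    rw [pvB_fold, PySem.List.pyRange_one, List.nil_append, List.map_map]
    have hN : (width * height - 0).toNat = width.toNat * height.toNat := by
      rw [Int.sub_zero, Int.toNat_mul hw.le hh.le]
    rw [hN, ← pvB_canon width hw height.toNat]
    refine List.map_congr_left (fun k _ => ?_)
    simp
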